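-- pv_equiv track=rewrite | github.com/Tri125/Floorplanning | SlicingTree.py | operatorGeneration
-- ===== SOURCE A (Python) =====
-- def operatorGeneration(nbOperator):
-- 		operator = ["-", "|"]
-- 		listOperator = []
-- 		listOperatorReverse = []
-- 		listOperatorPerm = []
-- 		for x in range (0, nbOperator):
-- 				listOperator.append(operator[x%2])
-- 				listOperatorReverse.append(operator[(x+1)%2])
-- 		listOperatorPerm.append(listOperator)
-- 		listOperatorPerm.append(listOperatorReverse)
--
-- 		return listOperatorPerm
-- ===== SOURCE B (Python) =====
-- def operatorGeneration(nbOperator):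
--     reps = (max(nbOperator, 0) + 1) // 2
--     return [(["-", "|"] * reps)[:nbOperator],
--             (["|", "-"] * reps)[:nbOperator]]
-- ===== Notes on version B (the rewrite author's own statement) =====
-- stated objective: faster
-- what changed: B replaces the per-index parity loop by pattern tiling: it replicates the two-element period ceil(n/2) times via list multiplication (and its swapped period for the second list) and trims each tiled list to length n with one slice, so no per-element index arithmetic or append remains.
import Mathlib
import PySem

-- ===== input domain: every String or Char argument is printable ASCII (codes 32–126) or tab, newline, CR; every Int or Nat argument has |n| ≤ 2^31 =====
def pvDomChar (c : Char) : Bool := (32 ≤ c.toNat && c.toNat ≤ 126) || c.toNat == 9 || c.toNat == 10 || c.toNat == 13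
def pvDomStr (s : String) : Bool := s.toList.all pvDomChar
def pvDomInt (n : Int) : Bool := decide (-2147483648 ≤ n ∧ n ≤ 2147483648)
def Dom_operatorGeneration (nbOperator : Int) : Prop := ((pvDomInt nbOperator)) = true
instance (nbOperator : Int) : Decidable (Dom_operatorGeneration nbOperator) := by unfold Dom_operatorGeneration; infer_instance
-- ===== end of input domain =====

-- B tiles the two-element period ceil(n/2) times by list multiplication (and the swapped
-- period for the second list) and trims each to length n with one slice; no per-index
-- parity arithmetic or element-by-element construction (objective: faster, constant-factor; measured).

-- ===== PORT A =====
def operatorGeneration (nbOperator : Int) : List (List String) :=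
  let operator : List String := ["-", "|"]
  -- operator[x%2] is always in range (x % 2 ∈ {0,1}); pyGetD is exact here
  let p := (PySem.List.pyRange 0 nbOperator 1).foldl
    (fun (st : List String × List String) x =>
      (st.1 ++ [PySem.List.pyGetD operator (PySem.Int.mod x 2) ""],
       st.2 ++ [PySem.List.pyGetD operator (PySem.Int.mod (x + 1) 2) ""]))
    ([], [])
  [p.1, p.2]

-- ===== PORT B =====
-- Python's 'lst * reps' (reps ≥ 0 here) is (List.replicate reps lst).flatten — exact.
def operatorGeneration_alt (nbOperator : Int) : List (List String) :=
  let reps := PySem.Int.floordiv (max nbOperator 0 + 1) 2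
  [PySem.List.slice ((List.replicate reps.toNat ["-", "|"]).flatten) none (some nbOperator),
   PySem.List.slice ((List.replicate reps.toNat ["|", "-"]).flatten) none (some nbOperator)]

-- ===== PRECONDITION & SPEC =====
def Spec_operatorGeneration (nbOperator : Int) (out : List (List String)) : Prop := out = operatorGeneration_alt nbOperator
instance (nbOperator : Int) (out : List (List String)) : Decidable (Spec_operatorGeneration nbOperator out) := by unfold Spec_operatorGeneration; infer_instance

-- ===== CLAIM (what is proved, stated in full; the proofs are below) =====
def Claim_equal_operatorGeneration : Prop := ∀ (nbOperator : Int), Dom_operatorGeneration nbOperator → Spec_operatorGeneration nbOperator (operatorGeneration nbOperator)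

-- ===== LEMMAS AND PROOFS =====

-- A's loop appends to two accumulators: it is a pair of maps.
theorem pvFoldPair (f g : Int → String) (xs : List Int) (a b : List String) :
    xs.foldl (fun (st : List String × List String) x => (st.1 ++ [f x], st.2 ++ [g x])) (a, b)
      = (a ++ xs.map f, b ++ xs.map g) := by
  induction xs generalizing a b with
  | nil => simp
  | cons x xs ih => simp [List.foldl_cons, ih, List.append_assoc]

theorem pvCell (x : Int) :
    PySem.List.pyGetD ["-", "|"] (PySem.Int.mod x 2) "" =
      (if PySem.Int.mod x 2 = 0 then "-" else "|") := by
  have h0 : 0 ≤ PySem.Int.mod x 2 := PySem.Int.mod_nonneg x (by omega)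
  have h1 : PySem.Int.mod x 2 < 2 := PySem.Int.mod_lt x (by omega)
  interval_cases h : PySem.Int.mod x 2 <;> simp [PySem.List.pyGetD]

-- Tiling: k copies of the period [a, b] laid end to end IS the parity pattern of length 2k.
theorem pvTile (a b : String) (k : Nat) :
    (List.replicate k [a, b]).flatten
      = (List.range (2 * k)).map (fun i => if i % 2 = 0 then a else b) := by
  induction k with
  | zero => simp
  | succ k ih =>
    rw [List.replicate_succ', List.flatten_append, ih]
    have h2 : 2 * (k + 1) = (2 * k) + 1 + 1 := by omega
    rw [h2, List.range_succ, List.range_succ]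
    simp [Nat.add_mod, Nat.mul_mod_right]

-- Trimming the tiled list of length 2*ceil(n/2) to n elements gives the pattern of length n.
theorem pvTrim (a b : String) (n : Nat) :
    ((List.replicate ((n + 1) / 2) [a, b]).flatten).take n
      = (List.range n).map (fun i => if i % 2 = 0 then a else b) := by
  rw [pvTile, ← List.map_take, List.take_range]
  have h : min n (2 * ((n + 1) / 2)) = n := by omega
  rw [h]

theorem operatorGeneration_spec : Claim_equal_operatorGeneration := by
  intro nb _
  show operatorGeneration nb = operatorGeneration_alt nb
  unfold operatorGeneration operatorGeneration_alt
  rcases (by omega : nb < 0 ∨ 0 ≤ nb) with hlt | hpos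
  · -- negative n: A's range is empty; B's reps is 0 so both tiled lists are empty
    rw [PySem.List.pyRange_one_eq_nil (by omega)]
    have h1 : max nb 0 + 1 = 1 := by omega
    rw [h1]
    dsimp only
    have h0 : (PySem.Int.floordiv 1 2).toNat = 0 := by decide
    rw [h0]
    simp [PySem.List.slice]
  · obtain ⟨n, rfl⟩ : ∃ n : Nat, nb = (n : Int) := ⟨nb.toNat, (Int.toNat_of_nonneg hpos).symm⟩
    dsimp only
    rw [pvFoldPair]
    -- B's reps = (n+1)/2 in Nat
    have hmax : max (n : Int) 0 = (n : Int) := by omega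
    have hreps : (PySem.Int.floordiv (max (n : Int) 0 + 1) 2).toNat = (n + 1) / 2 := by
      rw [hmax]
      have h2 : PySem.Int.floordiv ((n : Int) + 1) 2 = (((n + 1) / 2 : Nat) : Int) := by
        exact_mod_cast PySem.Int.floordiv_natCast (n + 1) 2
      rw [h2]
      omega
    rw [hreps, PySem.List.slice_to_natCast, PySem.List.slice_to_natCast, pvTrim, pvTrim]
    -- A's side: convert the pyRange map to a range map and evaluate the parity cells
    rw [PySem.List.pyRange_one]
    simp only [List.map_map, List.nil_append]
    congr 1
    · apply List.map_congr_left
      intro k hk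
      rw [List.mem_range] at hk
      simp only [Function.comp, Int.sub_zero, Int.toNat_natCast] at *
      rw [pvCell]
      have : PySem.Int.mod (0 + (k : Int)) 2 = ((k % 2 : Nat) : Int) := by
        rw [Int.zero_add]
        exact_mod_cast PySem.Int.mod_natCast k 2
      rw [this]
      rcases Nat.mod_two_eq_zero_or_one k with h | h <;> simp [h]
    · congr 1
      apply List.map_congr_left
      intro k hk
      simp only [Function.comp, Int.sub_zero, Int.toNat_natCast] at *
      rw [pvCell]
      have : PySem.Int.mod (0 + (k : Int) + 1) 2 = (((k + 1) % 2 : Nat) : Int) := by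
        rw [Int.zero_add]
        have : (k : Int) + 1 = ((k + 1 : Nat) : Int) := by push_cast; ring
        rw [this]
        exact_mod_cast PySem.Int.mod_natCast (k + 1) 2
      rw [this]
      rcases Nat.mod_two_eq_zero_or_one k with h | h <;>
        simp [h, Nat.add_mod]
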